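-- pv_equiv track=rewrite | github.com/shubham-aicoder/100DaysOfCode | 100DoC_D27.py | return_vertically
-- ===== SOURCE A (Python) =====
-- def return_vertically(input_string):
--     #write your code here
--
--     l=input_string.split(" ")
--     _max=len(l[0])
--     for i in range(1,len(l)):
--         if len(l[i])>_max:
--             _max=len(l[i])
--     j=0
--     l1=[]
--     while(j<=_max-1):
--         l2=[]
--         for i in l:
--             try:
--                 l2+=i[j]
--             except:
--                 l2+=' '
--         l1.append(("".join(l2)).rstrip())
--         j+=1
--     return l1
-- ===== SOURCE B (Python) =====
-- def return_vertically(input_string):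
--     words = input_string.split(" ")
--     out = []
--     while any(words):
--         out.append("".join(w[0] if w else " " for w in words).rstrip())
--         words = [w[1:] for w in words]
--     return out
-- ===== Notes on version B (the rewrite author's own statement) =====
-- stated objective: simpler
-- what changed: Instead of computing the maximum word length and indexing each word per column with a try/except, B repeatedly peels the first character of every word (empty words contribute a space) until all words are exhausted, so no max, no indexing and no exception handling are needed.
import Mathlib
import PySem

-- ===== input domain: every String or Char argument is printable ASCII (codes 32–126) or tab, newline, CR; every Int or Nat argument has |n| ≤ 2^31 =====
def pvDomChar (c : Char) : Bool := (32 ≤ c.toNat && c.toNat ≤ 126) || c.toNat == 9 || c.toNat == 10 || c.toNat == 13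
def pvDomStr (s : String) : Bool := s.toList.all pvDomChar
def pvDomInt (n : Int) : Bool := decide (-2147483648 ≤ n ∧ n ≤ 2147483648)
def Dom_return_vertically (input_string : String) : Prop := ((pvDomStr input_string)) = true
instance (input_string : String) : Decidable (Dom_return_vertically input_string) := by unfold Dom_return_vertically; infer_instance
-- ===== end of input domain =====

-- B replaces A's max-length computation and per-column try/except indexing by repeatedly
-- peeling the first character of every word (simpler: no max, no indexing, no exceptions).

-- ===== PORT A =====
-- the inner 'for i in l: try l2+=i[j] except l2+=' '' loop (l2 as a list of chars)
def pvColA (l : List String) (j : Int) : List Char :=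
  l.foldl (fun acc i =>
    match PySem.Str.pyGet? i j with
    | some c => acc ++ [c]
    | none   => acc ++ [' ']) []

-- the 'while j <= _max-1' loop
def pvLoopA (l : List String) (mx j : Int) (l1 : List String) : List String :=
  if h : j ≤ mx - 1 then
    pvLoopA l mx (j + 1) (l1 ++ [PySem.Str.rstrip (String.mk (pvColA l j))])
  else l1
termination_by (mx - j).toNat
decreasing_by omega

def return_vertically (input_string : String) : List String :=
  let l := (PySem.Str.split? input_string " ").getD []  -- sep " " ≠ "": split never raises
  -- l[0] is safe: split always returns a nonempty list
  let mx := (PySem.List.pyRange 1 (PySem.List.len l)).foldl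
    (fun m i => if PySem.Str.len (PySem.List.pyGetD l i "") > m
                then PySem.Str.len (PySem.List.pyGetD l i "") else m)
    (PySem.Str.len (PySem.List.pyGetD l 0 ""))
  pvLoopA l mx 0 []

-- ===== PORT B =====
-- termination helper for the 'while any(words)' loop (total chars strictly decrease)
theorem pvSum_drop_lt (ws : List (List Char)) (h : ws.any (fun w => !w.isEmpty) = true) :
    ((ws.map (fun w => w.drop 1)).map List.length).sum < (ws.map List.length).sum := by
  induction ws with
  | nil => simp at h
  | cons w t ih =>
    simp only [List.any_cons, Bool.or_eq_true] at h
    rcases h with h | h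
    · have hw : w ≠ [] := by
        cases w <;> simp_all
      have : (w.drop 1).length < w.length := by
        cases w with
        | nil => exact absurd rfl hw
        | cons c cs => simp
      have hle : ∀ (us : List (List Char)),
          ((us.map (fun w => w.drop 1)).map List.length).sum ≤ (us.map List.length).sum := by
        intro us
        induction us with
        | nil => simp
        | cons u v ihv => simp only [List.map_cons, List.sum_cons]; have := u.length_drop (i := 1); omega
      have := hle t
      simp only [List.map_cons, List.sum_cons]
      omega
    · have := ih h
      simp only [List.map_cons, List.sum_cons]
      have := w.length_drop (i := 1)
      omega

-- the 'while any(words)' loop; words kept as char lists (string ops done on the Chars side)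
def pvLoopB (ws : List (List Char)) (out : List String) : List String :=
  if h : ws.any (fun w => !w.isEmpty) = true then
    pvLoopB (ws.map (fun w => w.drop 1))
      (out ++ [PySem.Str.rstrip (String.mk (ws.map (fun w => w.headD ' ')))])
  else out
termination_by (ws.map List.length).sum
decreasing_by simpa using pvSum_drop_lt ws h

def return_vertically_alt (input_string : String) : List String :=
  let words := (PySem.Str.split? input_string " ").getD []  -- sep " " ≠ "": split never raises
  pvLoopB (words.map String.toList) []

-- ===== PRECONDITION & SPEC =====
def Spec_return_vertically (input_string : String) (out : List String) : Prop := out = return_vertically_alt input_string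
instance (input_string : String) (out : List String) : Decidable (Spec_return_vertically input_string out) := by unfold Spec_return_vertically; infer_instance

-- ===== CLAIM (what is proved, stated in full; the proofs are below) =====
def Claim_equal_return_vertically : Prop := ∀ (input_string : String), Dom_return_vertically input_string → Spec_return_vertically input_string (return_vertically input_string)

-- ===== LEMMAS AND PROOFS =====

-- the maximum word length
def pvMaxLen (ws : List (List Char)) : Nat := (ws.map List.length).foldr max 0

-- column j of the word table, padded with spaces
def pvColN (ws : List (List Char)) (j : Nat) : List Char :=
  ws.map (fun w => (w[j]?).getD ' ')

theorem pvColA_eq (l : List String) (jn : Nat) :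
    pvColA l (jn : Int) = pvColN (l.map String.toList) jn := by
  unfold pvColA pvColN
  have : ∀ (acc : List Char),
      l.foldl (fun acc i =>
        match PySem.Str.pyGet? i (jn : Int) with
        | some c => acc ++ [c]
        | none   => acc ++ [' ']) acc
      = acc ++ (l.map String.toList).map (fun w => (w[jn]?).getD ' ') := by
    induction l with
    | nil => intro acc; simp
    | cons s t ih =>
      intro acc
      simp only [List.foldl_cons, List.map_cons]
      rw [ih]
      have hs : (match PySem.Str.pyGet? s (jn : Int) with
          | some c => acc ++ [c]
          | none   => acc ++ [' ']) = acc ++ [(s.toList[jn]?).getD ' '] := by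
        rw [PySem.Str.pyGet?_natCast]
        cases s.toList[jn]? <;> simp
      rw [hs]
      simp
  simpa using this []

theorem pvLoopA_eq (l : List String) (mxN : Nat) :
    ∀ (jn : Nat) (out : List String),
    pvLoopA l (mxN : Int) (jn : Int) out
      = out ++ (List.range (mxN - jn)).map
          (fun t => PySem.Str.rstrip (String.mk (pvColN (l.map String.toList) (jn + t)))) := by
  intro jn
  induction hk : mxN - jn generalizing jn with
  | zero =>
    intro out
    rw [pvLoopA]
    have : ¬ ((jn : Int) ≤ (mxN : Int) - 1) := by omega
    simp [this, hk]
  | succ k ih =>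
    intro out
    rw [pvLoopA]
    have hlt : (jn : Int) ≤ (mxN : Int) - 1 := by omega
    rw [dif_pos hlt]
    have h1 : ((jn : Int) + 1) = ((jn + 1 : Nat) : Int) := by push_cast; ring
    rw [h1, ih (jn + 1) (by omega)]
    rw [List.range_succ_eq_map]
    simp only [List.map_cons, List.map_map]
    rw [pvColA_eq]
    simp only [Nat.add_zero, List.append_assoc, List.singleton_append]
    congr 1
    congr 1
    apply List.map_congr_left
    intro t _
    simp only [Function.comp_apply]
    have h2 : jn + 1 + t = jn + (t + 1) := by omega
    rw [h2]

theorem pvMaxFold (rest : List String) :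
    ∀ (m0 : Int), 0 ≤ m0 →
    rest.foldl (fun m s => if PySem.Str.len s > m then PySem.Str.len s else m) m0
      = max m0 ((pvMaxLen (rest.map String.toList) : Nat) : Int) := by
  induction rest with
  | nil => intro m0 h; simp [pvMaxLen]; omega
  | cons s t ih =>
    intro m0 h
    simp only [List.foldl_cons]
    have hlen : (0:Int) ≤ PySem.Str.len s := by
      rw [PySem.Str.len_eq]; positivity
    have hstep : (if PySem.Str.len s > m0 then PySem.Str.len s else m0) = max m0 (PySem.Str.len s) := by
      split_ifs <;> omega
    rw [hstep, ih _ (by omega)]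
    simp only [pvMaxLen, List.map_cons, List.foldr_cons]
    rw [PySem.Str.len_eq]
    push_cast
    omega

theorem pvMaxA (l : List String) :
    (PySem.List.pyRange 1 (PySem.List.len l)).foldl
      (fun m i => if PySem.Str.len (PySem.List.pyGetD l i "") > m
                  then PySem.Str.len (PySem.List.pyGetD l i "") else m)
      (PySem.Str.len (PySem.List.pyGetD l 0 ""))
    = ((pvMaxLen (l.map String.toList) : Nat) : Int) := by
  cases l with
  | nil => simp [PySem.List.pyRange_one, PySem.List.pyGetD, PySem.List.pyIdx?, PySem.Str.len, pvMaxLen]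
  | cons w t =>
    rw [PySem.List.foldl_pyRange_pyGetD (w :: t) ""
      (fun m s => if PySem.Str.len s > m then PySem.Str.len s else m) _ (a := 1) (by omega)]
    simp only [Int.toNat_one, List.drop_succ_cons, List.drop_zero]
    rw [PySem.List.pyGetD_zero_cons]
    have h0 : (0:Int) ≤ PySem.Str.len w := by rw [PySem.Str.len_eq]; positivity
    rw [pvMaxFold t _ h0]
    simp only [pvMaxLen, List.map_cons, List.foldr_cons]
    rw [PySem.Str.len_eq]
    push_cast
    omega

theorem pvMaxLen_zero_of_all_empty (ws : List (List Char))
    (h : ws.any (fun w => !w.isEmpty) = false) : pvMaxLen ws = 0 := by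
  induction ws with
  | nil => simp [pvMaxLen]
  | cons w t ih =>
    simp only [List.any_cons, Bool.or_eq_false_iff] at h
    have hw : w = [] := by cases w <;> simp_all
    have ht := ih h.2
    simp only [pvMaxLen, List.map_cons, List.foldr_cons, hw, List.length_nil] at *
    omega

theorem pvMaxLen_pos_of_any (ws : List (List Char))
    (h : ws.any (fun w => !w.isEmpty) = true) : 0 < pvMaxLen ws := by
  induction ws with
  | nil => simp at h
  | cons w t ih =>
    simp only [List.any_cons, Bool.or_eq_true] at h
    simp only [pvMaxLen, List.map_cons, List.foldr_cons]
    rcases h with h | h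
    · have : w ≠ [] := by cases w <;> simp_all
      have : 0 < w.length := List.length_pos_iff.mpr this
      omega
    · have := ih h
      simp only [pvMaxLen] at this
      omega

theorem pvMaxLen_drop (ws : List (List Char)) :
    pvMaxLen (ws.map (fun w => w.drop 1)) = pvMaxLen ws - 1 := by
  induction ws with
  | nil => simp [pvMaxLen]
  | cons w t ih =>
    simp only [pvMaxLen, List.map_cons, List.foldr_cons] at *
    have hw := w.length_drop (i := 1)
    omega

theorem pvColN_drop (ws : List (List Char)) (j : Nat) :
    pvColN (ws.map (fun w => w.drop 1)) j = pvColN ws (j + 1) := by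
  unfold pvColN
  rw [List.map_map]
  apply List.map_congr_left
  intro w _
  cases w <;> simp

theorem pvColN_zero (ws : List (List Char)) :
    ws.map (fun w => w.headD ' ') = pvColN ws 0 := by
  unfold pvColN
  apply List.map_congr_left
  intro w _
  cases w <;> simp

theorem pvLoopB_eq (n : Nat) : ∀ (ws : List (List Char)), pvMaxLen ws = n → ∀ (out : List String),
    pvLoopB ws out
      = out ++ (List.range n).map (fun j => PySem.Str.rstrip (String.mk (pvColN ws j))) := by
  induction n using Nat.strong_induction_on with
  | _ n ih =>
    intro ws hn out
    rw [pvLoopB.eq_def]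
    by_cases h : ws.any (fun w => !w.isEmpty) = true
    · rw [dif_pos h]
      have hpos := pvMaxLen_pos_of_any ws h
      have hdrop := pvMaxLen_drop ws
      rw [ih (n - 1) (by omega) _ (by omega)]
      subst hn
      have hsplit : List.range (pvMaxLen ws) = 0 :: (List.range (pvMaxLen ws - 1)).map (· + 1) := by
        have : pvMaxLen ws = (pvMaxLen ws - 1) + 1 := by omega
        rw [this, List.range_succ_eq_map]
        simp
      rw [hsplit]
      simp only [List.map_cons, List.map_map, List.append_assoc, List.singleton_append]
      rw [pvColN_zero]
      congr 1
      congr 1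
      apply List.map_congr_left
      intro j _
      simp only [Function.comp_apply]
      rw [pvColN_drop]
    · rw [dif_neg h]
      have := pvMaxLen_zero_of_all_empty ws (by simpa using h)
      rw [← hn, this]
      simp

-- ===== VERDICT (by name: the statement is the Claim_ definition above) =====
theorem return_vertically_spec : Claim_equal_return_vertically := by
  unfold Claim_equal_return_vertically Spec_return_vertically
  intro s _
  unfold return_vertically return_vertically_alt
  dsimp only
  generalize (PySem.Str.split? s " ").getD [] = l
  rw [pvMaxA l]
  have h0 : (0 : Int) = ((0 : Nat) : Int) := rfl
  rw [h0, pvLoopA_eq l (pvMaxLen (l.map String.toList)) 0 []]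
  rw [pvLoopB_eq (pvMaxLen (l.map String.toList)) (l.map String.toList) rfl []]
  simp
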